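-- pv_equiv track=rewrite | github.com/Harrygithubportfolio/Password-Generator | Advpasswordgen.py | contains_common_substitutions
-- ===== SOURCE A (Python) =====
-- def contains_common_substitutions(password):
--     substitutions = {
--         '4': 'a', '@': 'a', '3': 'e', '1': 'l', '0': 'o', '$': 's', '!': 'i'
--     }
--
--     for sub, char in substitutions.items():
--         if sub in password.lower() or char in password.lower():
--             return True
--     return False
-- ===== SOURCE B (Python) =====
-- _LEET_CHARS = frozenset('4@310$!aelois')
--
-- def contains_common_substitutions(password):
--     for ch in password.lower():
--         if ch in _LEET_CHARS:
--             return True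
--     return False
-- ===== Notes on version B (the rewrite author's own statement) =====
-- stated objective: simpler
-- what changed: Instead of looping over the seven substitution pairs and rescanning (and re-lowering) the whole password twice per pair, B lowers the password once and makes a single pass over its characters, short-circuiting on the first character in the fixed 13-character key/target set.
import Mathlib
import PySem

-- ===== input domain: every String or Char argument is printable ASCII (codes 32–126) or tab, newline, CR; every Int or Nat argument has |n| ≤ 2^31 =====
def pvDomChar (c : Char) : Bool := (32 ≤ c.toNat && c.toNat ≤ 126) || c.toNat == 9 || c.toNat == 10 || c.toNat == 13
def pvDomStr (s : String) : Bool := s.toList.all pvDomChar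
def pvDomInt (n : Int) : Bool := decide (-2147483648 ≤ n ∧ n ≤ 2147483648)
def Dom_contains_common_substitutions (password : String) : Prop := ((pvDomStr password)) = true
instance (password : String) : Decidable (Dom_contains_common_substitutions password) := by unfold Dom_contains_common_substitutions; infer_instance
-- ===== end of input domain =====

-- B lowers the password once and scans its characters in a single short-circuit pass over a fixed 13-char set,
-- instead of A's loop over seven substitution pairs with two substring scans (and re-lowerings) each: simpler, one pass.


-- ===== PORT A =====
-- A's dict of substitutions, as its items list in insertion order.
def pvSubsA : List (String × String) :=
  [("4", "a"), ("@", "a"), ("3", "e"), ("1", "l"), ("0", "o"), ("$", "s"), ("!", "i")]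

-- the 'for sub, char in substitutions.items(): if … return True' loop
def pvLoopA (password : String) : List (String × String) → Bool
  | [] => false
  | (sub, ch) :: rest =>
      if PySem.Str.isIn sub (PySem.Str.lower password) || PySem.Str.isIn ch (PySem.Str.lower password) then
        true
      else
        pvLoopA password rest

def contains_common_substitutions (password : String) : Bool :=
  pvLoopA password pvSubsA

-- ===== PORT B =====
-- frozenset('4@310$!aelois'): the seven keys plus their six distinct target letters
def pvLeetChars : PySem.Set Char := PySem.Set.ofList "4@310$!aelois".toList

-- single pass over the lowered password, short-circuiting on the first hit
def contains_common_substitutions_alt (password : String) : Bool :=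
  (PySem.Str.lower password).toList.any (fun ch => PySem.Set.contains pvLeetChars ch)

-- ===== PRECONDITION & SPEC =====
def Spec_contains_common_substitutions (password : String) (out : Bool) : Prop := out = contains_common_substitutions_alt password
instance (password : String) (out : Bool) : Decidable (Spec_contains_common_substitutions password out) := by unfold Spec_contains_common_substitutions; infer_instance

-- ===== CLAIM (what is proved, stated in full; the proofs are below) =====
def Claim_equal_contains_common_substitutions : Prop := ∀ (password : String), Dom_contains_common_substitutions password → Spec_contains_common_substitutions password (contains_common_substitutions password)

-- ===== LEMMAS AND PROOFS =====

lemma loopA_eq_any (pw : String) (l : List (String × String)) :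
    pvLoopA pw l = l.any (fun p =>
      PySem.Str.isIn p.1 (PySem.Str.lower pw) || PySem.Str.isIn p.2 (PySem.Str.lower pw)) := by
  induction l with
  | nil => rfl
  | cons p rest ih =>
    obtain ⟨sub, ch⟩ := p
    rw [pvLoopA, List.any_cons, ih]
    cases _h : (PySem.Str.isIn sub (PySem.Str.lower pw) || PySem.Str.isIn ch (PySem.Str.lower pw)) <;> simp

lemma single_isIn (s0 : String) (c : Char) (h2 : s0.toList = [c]) {s : String}
    (h : c ∈ s.toList) : PySem.Str.isIn s0 s = true := by
  rw [PySem.Str.isIn_eq, h2]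
  exact (PySem.Chars.isIn_iff_infix _ _).mpr ((List.singleton_infix_iff _ _).mpr h)

lemma main (pw : String) :
    pvLoopA pw pvSubsA
      = (PySem.Str.lower pw).toList.any (fun ch => PySem.Set.contains pvLeetChars ch) := by
  rw [loopA_eq_any, Bool.eq_iff_iff, List.any_eq_true, List.any_eq_true]
  constructor
  · rintro ⟨p, hp, hor⟩
    fin_cases hp <;>
    · rw [Bool.or_eq_true, PySem.Str.isIn_eq, PySem.Str.isIn_eq,
          PySem.Chars.isIn_iff_infix, PySem.Chars.isIn_iff_infix] at hor
      rcases hor with h | h <;>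
        exact ⟨_, (List.singleton_infix_iff _ _).mp h, by decide⟩
  · rintro ⟨c, hcL, hcS⟩
    have hmem : c ∈ ['4', '@', '3', '1', '0', '$', '!', 'a', 'e', 'l', 'o', 'i', 's'] := by
      have h1 := (PySem.Set.contains_iff pvLeetChars c).mp hcS
      simpa [pvLeetChars, PySem.Set.mem_ofList] using h1
    fin_cases hmem <;>
      first
      | (refine ⟨("4", "a"), by decide, ?_⟩; rw [Bool.or_eq_true];
         first
           | exact Or.inl (single_isIn _ _ rfl hcL)
           | exact Or.inr (single_isIn _ _ rfl hcL))
      | (refine ⟨("@", "a"), by decide, ?_⟩; rw [Bool.or_eq_true];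
         first
           | exact Or.inl (single_isIn _ _ rfl hcL)
           | exact Or.inr (single_isIn _ _ rfl hcL))
      | (refine ⟨("3", "e"), by decide, ?_⟩; rw [Bool.or_eq_true];
         first
           | exact Or.inl (single_isIn _ _ rfl hcL)
           | exact Or.inr (single_isIn _ _ rfl hcL))
      | (refine ⟨("1", "l"), by decide, ?_⟩; rw [Bool.or_eq_true];
         first
           | exact Or.inl (single_isIn _ _ rfl hcL)
           | exact Or.inr (single_isIn _ _ rfl hcL))
      | (refine ⟨("0", "o"), by decide, ?_⟩; rw [Bool.or_eq_true];
         first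
           | exact Or.inl (single_isIn _ _ rfl hcL)
           | exact Or.inr (single_isIn _ _ rfl hcL))
      | (refine ⟨("$", "s"), by decide, ?_⟩; rw [Bool.or_eq_true];
         first
           | exact Or.inl (single_isIn _ _ rfl hcL)
           | exact Or.inr (single_isIn _ _ rfl hcL))
      | (refine ⟨("!", "i"), by decide, ?_⟩; rw [Bool.or_eq_true];
         first
           | exact Or.inl (single_isIn _ _ rfl hcL)
           | exact Or.inr (single_isIn _ _ rfl hcL))

-- ===== VERDICT (by name: the statement is the Claim_ definition above) =====
theorem contains_common_substitutions_spec : Claim_equal_contains_common_substitutions := by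
  intro password _
  unfold Spec_contains_common_substitutions
  unfold contains_common_substitutions contains_common_substitutions_alt
  exact main password
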